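-- pv_equiv track=rewrite | github.com/Radcliffe/OEIS-Python | src/oeispy/A034/A034945.py | a034945
-- ===== SOURCE A (Python) =====
-- def a034945(n):
--     ary=[0]
--     a, mod=3, 7
--     while len(ary) - 1<n:
--         b=a%mod
--         if b!=ary[-1]: ary.append(b)
--         a=b**2 + b - 2
--         mod*=7
--     return ary
-- ===== SOURCE B (Python) =====
-- def a034945(n):
--     # Digit-by-digit lifting of the 7-adic square root of 2 (branch 3 mod 7), driven by
--     # term count: the outer loop produces exactly n-1 further terms; the inner scan for
--     # the next nonzero base-7 digit is BOUNDED, since 0 < x*x-2 < 7**(2k) guarantees a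
--     # nonzero digit at some level j+1 with k <= j < 2k.
--     if n <= 0:
--         return [0]
--     seq = [0, 3]
--     x, k = 3, 1
--     for _ in range(n - 1):
--         for j in range(k, 2 * k):
--             d = ((x * x - 2) // 7 ** j) % 7
--             if d:
--                 x += d * 7 ** j
--                 k = j + 1
--                 seq.append(x)
--                 break
--     return seq
-- ===== Notes on version B (the rewrite author's own statement) =====
-- stated objective: alternative
-- what changed: A iterates the fixed-point map b <- (b^2+b-2) mod 7^k in one unbounded while-loop that skips repeated values; B instead lifts the 7-adic square root of 2 digit by digit, with an outer loop producing exactly n-1 further terms and, per term, a bounded inner scan for j in range(k, 2k) for the next nonzero base-7 digit (bounded because 0 < x*x-2 < 7^(2k)).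
import Mathlib
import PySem

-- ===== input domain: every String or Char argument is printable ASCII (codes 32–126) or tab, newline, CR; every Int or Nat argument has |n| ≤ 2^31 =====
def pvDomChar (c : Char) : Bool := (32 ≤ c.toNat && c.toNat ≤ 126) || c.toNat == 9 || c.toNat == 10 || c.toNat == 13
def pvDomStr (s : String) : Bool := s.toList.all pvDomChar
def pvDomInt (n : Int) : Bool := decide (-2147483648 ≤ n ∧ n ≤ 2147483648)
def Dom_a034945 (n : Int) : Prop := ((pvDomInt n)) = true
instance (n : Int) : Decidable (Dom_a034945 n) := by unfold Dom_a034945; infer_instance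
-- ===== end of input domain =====

-- B replaces A's unbounded fixed-point loop (b ← b²+b−2 mod 7^k, skip on repeats) by a
-- term-counting digit lift of the 7-adic sqrt(2): an outer pass producing exactly n−1
-- further terms, each found by a BOUNDED scan for the next nonzero base-7 digit.
-- A's while-loop is made total with a fuel guard consumed only on digit-zero steps; the
-- guard branch is proved unreachable from a034945's initial state (see run_eq below).

-- first component of A's termination measure decreases when the loop appends
theorem dec_append (n : Int) (ys : List Int) (b : Int)
    (hcond : (ys.length : Int) - 1 < n) :
    n.toNat + 1 - (ys ++ [b]).length < n.toNat + 1 - ys.length := by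
  -- proved by hand (no omega): keeps the termination proof term small
  have h3 : (ys.length : Int) ≤ n := Int.sub_one_lt_iff.mp hcond
  have h4 : ys.length ≤ n.toNat := by
    have h5 := Int.toNat_le_toNat h3
    rwa [Int.toNat_natCast] at h5
  rw [List.length_append]
  exact Nat.sub_succ_lt_self (n.toNat + 1) ys.length (Nat.lt_succ_of_le h4)

-- ===== PORT A =====
-- literal port of A's while-loop; `guard` is a fuel guard for the digit-zero steps only
def loopA (n : Int) (ary : List Int) (a mod : Int) (guard : Nat) : List Int :=
  if hcond : (ary.length : Int) - 1 < n then
    let b := PySem.Int.mod a mod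
    if b ≠ ary.getLastD 0 then
      loopA n (ary ++ [b]) (b ^ 2 + b - 2) (mod * 7) (mod * 7).toNat
    else
      match guard with
      | 0 => ary  -- fuel guard: proved unreachable from a034945's initial state
      | g + 1 => loopA n ary (b ^ 2 + b - 2) (mod * 7) g
  else ary
termination_by (n.toNat + 1 - ary.length, guard)
decreasing_by
  · exact Prod.Lex.left _ _ (dec_append n ary b hcond)
  · exact Prod.Lex.right _ (Nat.lt_succ_self g)

def a034945 (n : Int) : List Int := loopA n [0] 3 7 7

-- ===== PORT B =====
-- inner bounded scan of Source B: `for j in range(k, 2*k)` looking for a nonzero digit;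
-- `rem` is the number of range elements still to visit, so no fuel guard is needed
def innerB (seq : List Int) (x : Int) (k j rem : Nat) : List Int × Int × Nat :=
  match rem with
  | 0 => (seq, x, k)
  | r + 1 =>
    let d := PySem.Int.mod (PySem.Int.floordiv (x * x - 2) (7 ^ j)) 7
    if d ≠ 0 then (seq ++ [x + d * 7 ^ j], x + d * 7 ^ j, j + 1)
    else innerB seq x k (j + 1) r

-- one outer iteration of Source B's `for _ in range(n - 1)` on the state (seq, x, k)
def stepB (st : List Int × Int × Nat) : List Int × Int × Nat :=
  innerB st.1 st.2.1 st.2.2 st.2.2 st.2.2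

def a034945_alt (n : Int) : List Int :=
  if n ≤ 0 then [0]
  else ((PySem.List.pyRange 0 (n - 1) 1).foldl (fun st _ => stepB st) ([0, 3], 3, 1)).1

-- ===== PRECONDITION & SPEC =====
def Spec_a034945 (n : Int) (out : List Int) : Prop := out = a034945_alt n
instance (n : Int) (out : List Int) : Decidable (Spec_a034945 n out) := by unfold Spec_a034945; infer_instance

-- ===== CLAIM (what is proved, stated in full; the proofs are below) =====
def Claim_equal_a034945 : Prop := ∀ (n : Int), Dom_a034945 n → Spec_a034945 n (a034945 n)

-- ===== LEMMAS AND PROOFS =====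

-- invariant: pk is a positive multiple of 7 and x is the canonical residue of the
-- 7-adic square root of 2 (branch ≡ 3 mod 7) modulo pk
def BInv (x pk : Int) : Prop :=
  0 < pk ∧ (7:Int) ∣ pk ∧ pk ∣ x * x - 2 ∧ x % 7 = 3 ∧ 0 ≤ x ∧ x < pk

-- facts about the next digit
theorem digit_facts (x pk : Int) (hpk : 0 < pk) :
    PySem.Int.mod (PySem.Int.floordiv (x * x - 2) pk) 7 = ((x * x - 2) / pk) % 7 ∧
    0 ≤ ((x * x - 2) / pk) % 7 ∧ ((x * x - 2) / pk) % 7 < 7 := by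
  refine ⟨by rw [PySem.Int.mod_eq_emod_of_pos (by norm_num : (0:Int) < 7),
                 PySem.Int.floordiv_eq_ediv_of_pos hpk], ?_, ?_⟩
  · exact Int.emod_nonneg _ (by norm_num)
  · exact Int.emod_lt_of_pos _ (by norm_num)

-- Hensel step: the lifted residue keeps the divisibility one level higher
theorem hensel_step (x pk : Int) (hpk : 0 < pk) (h7 : (7:Int) ∣ pk)
    (hdvd : pk ∣ x * x - 2) (hx7 : x % 7 = 3) :
    (pk * 7) ∣ (x + ((x * x - 2) / pk) % 7 * pk) * (x + ((x * x - 2) / pk) % 7 * pk) - 2 := by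
  obtain ⟨c, hc⟩ := hdvd
  have hcd : (x * x - 2) / pk = c := by rw [hc, Int.mul_ediv_cancel_left _ (by omega)]
  set d : Int := ((x * x - 2) / pk) % 7 with hd
  obtain ⟨e, he⟩ : (7:Int) ∣ c - d := by rw [hd, hcd]; exact ⟨c / 7, by omega⟩
  obtain ⟨u, hu⟩ : (7:Int) ∣ 2 * x - 6 := by omega
  obtain ⟨p, hp⟩ := h7
  refine ⟨e + d * u + d + d * d * p, ?_⟩
  linear_combination hc + pk * 7 * he + pk * d * hu + pk * d * d * hp - 6 * pk * he

-- the lifted state satisfies the invariant again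
theorem BInv_step (x pk : Int) (h : BInv x pk) :
    BInv (x + PySem.Int.mod (PySem.Int.floordiv (x * x - 2) pk) 7 * pk) (pk * 7) := by
  obtain ⟨hpk, h7, hdvd, hx7, hx0, hxpk⟩ := h
  obtain ⟨hd', hd0, hd7⟩ := digit_facts x pk hpk
  obtain ⟨p, hp⟩ := h7
  rw [hd']
  refine ⟨by omega, ⟨pk, by ring⟩, hensel_step x pk hpk ⟨p, hp⟩ hdvd hx7, ?_, ?_, ?_⟩
  · rw [show x + (x * x - 2) / pk % 7 * pk = x + 7 * ((x * x - 2) / pk % 7 * p) by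
          rw [hp]; ring, Int.add_mul_emod_self_left]
    exact hx7
  · nlinarith
  · nlinarith

-- if the digit is 0, the divisibility already holds one level higher
theorem dvd_of_digit_zero (x pk : Int) (hpk : 0 < pk) (hdvd : pk ∣ x * x - 2)
    (hd : PySem.Int.mod (PySem.Int.floordiv (x * x - 2) pk) 7 = 0) :
    (pk * 7) ∣ x * x - 2 := by
  obtain ⟨hd', _, _⟩ := digit_facts x pk hpk
  rw [hd'] at hd
  obtain ⟨c, hc⟩ := hdvd
  have hcd : (x * x - 2) / pk = c := by rw [hc, Int.mul_ediv_cancel_left _ (by omega)]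
  rw [hcd] at hd
  have ht : c = 7 * (c / 7) := by omega
  exact ⟨c / 7, by linear_combination hc + pk * ht⟩

-- A's next residue b equals the digit-lifted residue x + d·pk
theorem b_eq_lift (x pk a : Int) (hpk : 0 < pk) (hdvd : pk ∣ x * x - 2)
    (hx0 : 0 ≤ x) (hxpk : x < pk) (ha : a = x * x + x - 2) :
    PySem.Int.mod a (7 * pk) =
      x + PySem.Int.mod (PySem.Int.floordiv (x * x - 2) pk) 7 * pk := by
  obtain ⟨hd', hd0, hd7⟩ := digit_facts x pk hpk
  rw [hd', PySem.Int.mod_eq_emod_of_pos (by omega : (0:Int) < 7 * pk)]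
  obtain ⟨c, hc⟩ := hdvd
  have hcd : (x * x - 2) / pk = c := by rw [hc, Int.mul_ediv_cancel_left _ (by omega)]
  rw [hcd] at hd0 hd7 ⊢
  obtain ⟨e, he⟩ : (7:Int) ∣ c - c % 7 := ⟨c / 7, by omega⟩
  have hcong : a % (7 * pk) = (x + c % 7 * pk) % (7 * pk) := by
    have : (7 * pk) ∣ (x + c % 7 * pk) - a := ⟨-e, by linear_combination -hc - pk * he - ha⟩
    exact Int.ModEq.eq (Int.modEq_iff_dvd.mpr this)
  rw [hcong]
  apply Int.emod_eq_of_lt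
  · nlinarith
  · nlinarith

-- guard-reset bound for A's fuel
theorem guard_reset (m y : Int) (h0 : 0 ≤ y) (h1 : y < m) :
    y * y - 2 < m * 7 ^ m.toNat := by
  have hm : (0:Int) < m := by omega
  have h' : (m.toNat : Int) < 7 ^ m.toNat := by
    exact_mod_cast Nat.lt_pow_self (n := m.toNat) (by norm_num : (1:ℕ) < 7)
  have hmm : m ≤ 7 ^ m.toNat := by omega
  nlinarith

-- B's fold over range(n-1) is an iterate of stepB
theorem foldl_stepB (l : List Int) (s : List Int × Int × Nat) :
    List.foldl (fun st _ => stepB st) s l = stepB^[l.length] s := by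
  induction l generalizing s with
  | nil => rfl
  | cons a t ih =>
    simp only [List.foldl_cons, List.length_cons, Function.iterate_succ_apply, ih]

theorem innerB_pos (seq : List Int) (x : Int) (k j r : Nat)
    (h : PySem.Int.mod (PySem.Int.floordiv (x * x - 2) (7 ^ j)) 7 ≠ 0) :
    innerB seq x k j (r + 1) =
      (seq ++ [x + PySem.Int.mod (PySem.Int.floordiv (x * x - 2) (7 ^ j)) 7 * 7 ^ j],
       x + PySem.Int.mod (PySem.Int.floordiv (x * x - 2) (7 ^ j)) 7 * 7 ^ j, j + 1) := by
  simp only [innerB]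
  rw [if_pos h]

theorem innerB_zero (seq : List Int) (x : Int) (k j r : Nat)
    (h : PySem.Int.mod (PySem.Int.floordiv (x * x - 2) (7 ^ j)) 7 = 0) :
    innerB seq x k j (r + 1) = innerB seq x k (j + 1) r := by
  simp only [innerB]
  rw [if_neg (not_not_intro h)]

-- one run: A skips zero digits until the next nonzero digit, exactly as B's bounded
-- inner scan does, and both append the same lifted residue
theorem run_eq (n : Int) (c : Nat) (ary : List Int) (x : Int) (k : Nat)
    (ihTOP : ∀ (ary' : List Int) (x' : Int) (k' gA' : Nat), BInv x' ((7:Int) ^ k') →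
      ary'.getLastD 0 = x' → n = (ary'.length : Int) - 1 + c →
      x' * x' - 2 < (7:Int) ^ (k' + 1) * 7 ^ gA' →
      loopA n ary' (x' ^ 2 + x' - 2) ((7:Int) ^ (k' + 1)) gA' = (stepB^[c] (ary', x', k')).1)
    (hB : BInv x ((7:Int) ^ k)) (hlast : ary.getLastD 0 = x)
    (hn : n = (ary.length : Int) - 1 + (c + 1)) :
    ∀ (rem m gA : Nat), (7:Int) ^ (m - 1) ∣ x * x - 2 → k + 1 ≤ m → (m - 1) + rem = 2 * k →
      x * x - 2 < (7:Int) ^ m * 7 ^ gA →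
      loopA n ary (x ^ 2 + x - 2) ((7:Int) ^ m) gA = (stepB^[c] (innerB ary x k (m - 1) rem)).1 := by
  intro rem
  induction rem with
  | zero =>
    intro m gA hdvd hkm hsum hg
    exfalso
    obtain ⟨hpk, h7, hdvdk, hx7, hx0, hxk⟩ := hB
    have hx3 : 3 ≤ x := by omega
    have hpos : 0 < x * x - 2 := by nlinarith
    have hm1 : m - 1 = 2 * k := by omega
    rw [hm1] at hdvd
    have hlt : x * x - 2 < (7:Int) ^ (2 * k) := by
      have h2 : (7:Int) ^ (2 * k) = 7 ^ k * 7 ^ k := by rw [two_mul, pow_add]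
      rw [h2]; nlinarith
    have := Int.le_of_dvd hpos hdvd
    omega
  | succ r ih =>
    intro m gA hdvd hkm hsum hg
    obtain ⟨hpk, h7, hdvdk, hx7, hx0, hxk⟩ := id hB
    have hx3 : 3 ≤ x := by omega
    have hk1 : 1 ≤ k := by
      by_contra h
      have hk0 : k = 0 := by omega
      rw [hk0, pow_zero] at h7
      omega
    have hpk0 : (0:Int) < 7 ^ (m - 1) := pow_pos (by norm_num) _
    have hpkk : (7:Int) ^ k ≤ 7 ^ (m - 1) := pow_le_pow_right₀ (by norm_num) (by omega)
    have hmod : (7:Int) ^ m = 7 ^ (m - 1) * 7 := by rw [← pow_succ]; congr 1; omega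
    set d := PySem.Int.mod (PySem.Int.floordiv (x * x - 2) ((7:Int) ^ (m - 1))) 7 with hdDef
    obtain ⟨hd', hd0, hd7⟩ := digit_facts x ((7:Int) ^ (m - 1)) hpk0
    rw [← hdDef] at hd'
    rw [← hd'] at hd0 hd7
    have hbe : PySem.Int.mod (x ^ 2 + x - 2) ((7:Int) ^ m) = x + d * 7 ^ (m - 1) := by
      rw [hdDef, hmod, mul_comm]
      exact b_eq_lift x _ _ hpk0 hdvd hx0 (by omega) (by ring)
    have hcA : (ary.length : Int) - 1 < n := by omega
    rw [loopA, dif_pos hcA]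
    simp only [ne_eq]
    by_cases hd : d = 0
    · -- zero digit: A skips, B's scan moves to the next level
      have hdvd7 : (7:Int) ^ m ∣ x * x - 2 := by
        rw [hmod]
        exact dvd_of_digit_zero x ((7:Int) ^ (m - 1)) hpk0 hdvd (by rw [← hdDef]; exact hd)
      have hbx : PySem.Int.mod (x ^ 2 + x - 2) ((7:Int) ^ m) = x := by
        rw [hbe, hd]; ring
      rw [if_neg (by rw [hbx, hlast]; exact not_not_intro rfl)]
      rw [innerB_zero ary x k (m - 1) r (by rw [← hdDef]; exact hd)]
      have hpos : 0 < x * x - 2 := by nlinarith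
      cases gA with
      | zero =>
        exfalso
        have := Int.le_of_dvd hpos hdvd7
        rw [pow_zero, mul_one] at hg
        omega
      | succ g =>
        have hm2 : m - 1 + 1 = m + 1 - 1 := by omega
        rw [hbx, hm2]
        have hmod7 : (7:Int) ^ m * 7 = 7 ^ (m + 1) := by rw [pow_succ]
        rw [hmod7]
        exact ih (m + 1) g (by simpa using hdvd7) (by omega) (by omega)
          (by rw [pow_succ]; rw [pow_succ] at hg; linarith [mul_pos (pow_pos (by norm_num : (0:Int) < 7) m) (pow_pos (by norm_num : (0:Int) < 7) g)])
    · -- nonzero digit: both append the lifted residue x + d·7^(m-1)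
      have hdpos : 0 < d * 7 ^ (m - 1) := mul_pos (by omega) hpk0
      rw [if_pos (by rw [hbe, hlast]; intro hq; omega)]
      rw [hbe]
      rw [innerB_pos ary x k (m - 1) r (by rw [← hdDef]; exact hd)]
      rw [← hdDef, show m - 1 + 1 = m from by omega]
      have hBstep : BInv (x + d * 7 ^ (m - 1)) ((7:Int) ^ m) := by
        have h0 := BInv_step x ((7:Int) ^ (m - 1))
          ⟨hpk0, dvd_pow_self 7 (by omega : m - 1 ≠ 0), hdvd, hx7, hx0, by omega⟩
        rw [← hdDef, ← hmod] at h0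
        exact h0
      have hylt : x + d * 7 ^ (m - 1) < (7:Int) ^ (m + 1) := by
        have := hBstep.2.2.2.2.2
        have h7m : (0:Int) < 7 ^ m := pow_pos (by norm_num) _
        rw [pow_succ]; nlinarith
      have hmod7 : (7:Int) ^ m * 7 = 7 ^ (m + 1) := by rw [pow_succ]
      rw [hmod7]
      exact ihTOP (ary ++ [x + d * 7 ^ (m - 1)]) (x + d * 7 ^ (m - 1)) m
        (((7:Int) ^ (m + 1)).toNat) hBstep (by simp)
        (by simp only [List.length_append, List.length_cons, List.length_nil]; push_cast at hn ⊢; omega)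
        (guard_reset ((7:Int) ^ (m + 1)) _ hBstep.2.2.2.2.1 hylt)

-- whole loop: starting right after an append at level k, A's loop produces the next c
-- terms, matching c iterations of B's stepB
theorem top_eq (n : Int) (c : Nat) :
    ∀ (ary : List Int) (x : Int) (k gA : Nat), BInv x ((7:Int) ^ k) →
      ary.getLastD 0 = x → n = (ary.length : Int) - 1 + c →
      x * x - 2 < (7:Int) ^ (k + 1) * 7 ^ gA →
      loopA n ary (x ^ 2 + x - 2) ((7:Int) ^ (k + 1)) gA = (stepB^[c] (ary, x, k)).1 := by
  induction c with
  | zero =>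
    intro ary x k gA hB hlast hn hg
    rw [loopA, dif_neg (by push_cast at hn; omega)]
    rfl
  | succ c ih =>
    intro ary x k gA hB hlast hn hg
    have h := run_eq n c ary x k ih hB hlast (by push_cast at hn ⊢; omega)
      k (k + 1) gA (by simpa using hB.2.2.1) (by omega) (by omega) hg
    rw [Function.iterate_succ_apply]
    exact h

-- ===== VERDICT (by name: the statement is the Claim_ definition above) =====
theorem a034945_spec : Claim_equal_a034945 := by
  intro n _
  unfold Spec_a034945 a034945 a034945_alt
  by_cases hn : n ≤ 0
  · rw [if_pos hn, loopA, dif_neg (by simp; omega)]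
  · rw [if_neg hn, loopA, dif_pos (by simp; omega)]
    have h37 : PySem.Int.mod 3 7 = 3 := by decide
    simp only [h37]
    rw [if_pos (show (3:Int) ≠ [(0:Int)].getLastD 0 from by decide)]
    rw [foldl_stepB, PySem.List.length_pyRange_one, sub_zero]
    have h := top_eq n (n - 1).toNat [0, 3] 3 1 49
      ⟨by norm_num, by norm_num, by norm_num, by decide, by norm_num, by norm_num⟩
      (by simp)
      (by
        have hc : (((n - 1).toNat : Nat) : Int) = n - 1 := Int.toNat_of_nonneg (by omega)
        simp only [List.length_cons, List.length_nil, hc]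
        push_cast
        omega)
      (by norm_num)
    have e1 : ((7:Int) ^ (1 + 1)) = 7 * 7 := by norm_num
    rw [e1] at h
    exact h
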